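-- pv_equiv track=rewrite | github.com/zkwi/AiSRT | aisrt/local_asr.py | merge_language_names
-- ===== SOURCE A (Python) =====
-- def merge_language_names(languages: list[str]) -> str:
--     result: list[str] = []
--     previous = ""
--     for language in languages:
--         language = language.strip()
--         if language and language != previous:
--             result.append(language)
--             previous = language
--     return ",".join(result)
-- ===== SOURCE B (Python) =====
-- def merge_language_names(languages: list[str]) -> str:
--     out = ""
--     i = 0
--     n = len(languages)
--     while i < n:
--         head = languages[i].strip()
--         i += 1
--         if not head:
--             continue
--         out = head if not out else out + "," + head
--         while i < n and languages[i].strip() in ("", head):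
--             i += 1
--     return out
-- ===== Notes on version B (the rewrite author's own statement) =====
-- stated objective: alternative
-- what changed: Replaces A's stateful filter loop (persistent previous register, result list, final join) by index-driven nested while loops that consume each run of blanks/duplicates after a name in an inner loop and build the output string directly with conditional comma concatenation.
import Mathlib
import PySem

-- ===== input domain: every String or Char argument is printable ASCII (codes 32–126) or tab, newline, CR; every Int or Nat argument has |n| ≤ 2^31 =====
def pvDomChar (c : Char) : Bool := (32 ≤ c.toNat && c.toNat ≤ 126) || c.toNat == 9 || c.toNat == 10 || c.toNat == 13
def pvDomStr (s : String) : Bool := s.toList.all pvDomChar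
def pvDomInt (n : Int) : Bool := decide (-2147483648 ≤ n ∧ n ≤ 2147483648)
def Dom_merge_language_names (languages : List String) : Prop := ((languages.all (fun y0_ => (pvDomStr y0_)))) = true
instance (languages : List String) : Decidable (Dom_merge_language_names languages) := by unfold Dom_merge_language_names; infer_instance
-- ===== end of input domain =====

-- B replaces A's stateful filter loop (previous register + result list + join) by nested
-- run-skipping while loops that build the output string directly (alternative; same cost).


-- ===== PORT A =====
def merge_language_names (languages : List String) : String :=
  let st := languages.foldl
    (fun (acc : List String × String) language =>
      let language := PySem.Str.strip language
      if language ≠ "" ∧ language ≠ acc.2 then (acc.1 ++ [language], language) else acc)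
    ([], "")
  PySem.Str.join "," st.1

-- ===== PORT B =====
-- inner while loop: skip entries whose strip is blank or equals the current head
def pvSkipRun (head : String) : List String → List String
  | [] => []
  | x :: xs =>
    if PySem.Str.strip x = "" ∨ PySem.Str.strip x = head then pvSkipRun head xs else x :: xs

theorem pvSkipRun_length_le (h : String) (ls : List String) :
    (pvSkipRun h ls).length ≤ ls.length := by
  induction ls with
  | nil => simp [pvSkipRun]
  | cons x xs ih =>
    simp only [pvSkipRun]
    split
    · exact le_trans ih (Nat.le_succ _)
    · simp

-- outer while loop: take a name, append it to the output string, consume its run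
def pvGoB (out : String) (ls : List String) : String :=
  match ls with
  | [] => out
  | l :: ls' =>
    let head := PySem.Str.strip l
    if head = "" then pvGoB out ls'
    else pvGoB (if out = "" then head else out ++ "," ++ head) (pvSkipRun head ls')
termination_by ls.length
decreasing_by
  · simp
  · exact Nat.lt_succ_of_le (pvSkipRun_length_le _ _)

def merge_language_names_alt (languages : List String) : String := pvGoB "" languages

-- ===== PRECONDITION & SPEC =====
def Spec_merge_language_names (languages : List String) (out : String) : Prop :=
  out = merge_language_names_alt languages
instance (languages : List String) (out : String) :
    Decidable (Spec_merge_language_names languages out) := by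
  unfold Spec_merge_language_names; infer_instance

-- ===== CLAIM =====
def Claim_equal_merge_language_names : Prop :=
  ∀ (languages : List String), Dom_merge_language_names languages →
    Spec_merge_language_names languages (merge_language_names languages)

-- ===== LEMMAS AND PROOFS =====

/-- The stripped, non-blank name stream A effectively works on. -/
def pvNames (languages : List String) : List String :=
  languages.filterMap (fun l => let s := PySem.Str.strip l; if s = "" then none else some s)

/-- Consecutive-dedup of a list relative to a previous element. -/
def pvDedup (prev : String) : List String → List String
  | [] => []
  | x :: xs => if x = prev then pvDedup prev xs else x :: pvDedup x xs

/-- The list of names B appends, mirroring pvGoB's recursion. -/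
def pvAltList (ls : List String) : List String :=
  match ls with
  | [] => []
  | l :: ls' =>
    let head := PySem.Str.strip l
    if head = "" then pvAltList ls'
    else head :: pvAltList (pvSkipRun head ls')
termination_by ls.length
decreasing_by
  · simp
  · exact Nat.lt_succ_of_le (pvSkipRun_length_le _ _)

/-- A's fold over the raw list equals a fold over the stripped, non-blank stream. -/
theorem foldA_eq_foldNames (languages : List String) (res : List String) (prev : String) :
    languages.foldl
      (fun (acc : List String × String) language =>
        let language := PySem.Str.strip language
        if language ≠ "" ∧ language ≠ acc.2 then (acc.1 ++ [language], language) else acc)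
      (res, prev)
    = (pvNames languages).foldl
      (fun (acc : List String × String) s =>
        if s ≠ acc.2 then (acc.1 ++ [s], s) else acc)
      (res, prev) := by
  induction languages generalizing res prev with
  | nil => rfl
  | cons l ls ih =>
    simp only [List.foldl_cons, pvNames, List.filterMap_cons]
    by_cases h : PySem.Str.strip l = ""
    · simp [h, ih, pvNames]
    · rw [if_neg h]
      by_cases h2 : PySem.Str.strip l = prev
      · rw [List.foldl_cons, if_neg (by simp [h2]), if_neg (by simp [h2])]
        simpa [pvNames] using ih res prev
      · rw [List.foldl_cons, if_pos ⟨h, h2⟩, if_pos h2]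
        simpa [pvNames] using ih (res ++ [PySem.Str.strip l]) (PySem.Str.strip l)

/-- The previous-name register after the stream fold. -/
def pvLast (prev : String) : List String → String
  | [] => prev
  | x :: xs => pvLast x xs

/-- The stream fold produces the consecutive dedup. -/
theorem foldNames_eq_dedup (names : List String) (res : List String) (prev : String) :
    names.foldl
      (fun (acc : List String × String) s =>
        if s ≠ acc.2 then (acc.1 ++ [s], s) else acc)
      (res, prev)
    = (res ++ pvDedup prev names, pvLast prev names) := by
  induction names generalizing res prev with
  | nil => simp [pvDedup, pvLast]
  | cons x xs ih =>
    by_cases h : x = prev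
    · subst h
      simpa [pvDedup, pvLast] using ih res x
    · simpa [pvDedup, pvLast, h] using ih (res ++ [x]) x

/-- Skipping a run equals deduping against its head on the name stream. -/
theorem dedup_eq_altList_skip (ls : List String) (h : String) (hh : h ≠ "") :
    pvDedup h (pvNames ls) = pvAltList (pvSkipRun h ls) := by
  induction ls generalizing h with
  | nil => simp [pvNames, pvDedup, pvSkipRun, pvAltList]
  | cons x xs ih =>
    by_cases hb : PySem.Str.strip x = ""
    · rw [show pvNames (x :: xs) = pvNames xs by simp [pvNames, hb]]
      simpa [pvSkipRun, hb] using ih h hh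
    · rw [show pvNames (x :: xs) = PySem.Str.strip x :: pvNames xs by
          simp [pvNames, hb]]
      by_cases he : PySem.Str.strip x = h
      · rw [show pvSkipRun h (x :: xs) = pvSkipRun h xs by simp [pvSkipRun, he]]
        simpa [pvDedup, he] using ih h hh
      · rw [show pvSkipRun h (x :: xs) = x :: xs by simp [pvSkipRun, hb, he]]
        rw [show pvAltList (x :: xs)
              = PySem.Str.strip x :: pvAltList (pvSkipRun (PySem.Str.strip x) xs) by
            simp [pvAltList, hb]]
        simpa [pvDedup, he] using ih (PySem.Str.strip x) hb

/-- B's name list is the dedup of the stripped, non-blank stream. -/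
theorem altList_eq_dedup (ls : List String) : pvAltList ls = pvDedup "" (pvNames ls) := by
  induction ls with
  | nil => simp [pvNames, pvAltList, pvDedup]
  | cons x xs ih =>
    by_cases hb : PySem.Str.strip x = ""
    · rw [show pvNames (x :: xs) = pvNames xs by simp [pvNames, hb]]
      simpa [pvAltList, hb] using ih
    · rw [show pvAltList (x :: xs)
            = PySem.Str.strip x :: pvAltList (pvSkipRun (PySem.Str.strip x) xs) by
          simp [pvAltList, hb],
          show pvNames (x :: xs) = PySem.Str.strip x :: pvNames xs by
          simp [pvNames, hb],
          show pvDedup "" (PySem.Str.strip x :: pvNames xs)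
            = PySem.Str.strip x :: pvDedup (PySem.Str.strip x) (pvNames xs) by
          simp [pvDedup, hb],
          dedup_eq_altList_skip xs _ hb]

theorem altList_ne_empty (n : Nat) (ls : List String) (hn : ls.length ≤ n) :
    ∀ x ∈ pvAltList ls, x ≠ "" := by
  induction n generalizing ls with
  | zero =>
    cases ls with
    | nil => simp [pvAltList]
    | cons l ls' => simp at hn
  | succ n ih =>
    cases ls with
    | nil => simp [pvAltList]
    | cons l ls' =>
      by_cases hb : PySem.Str.strip l = ""
      · rw [show pvAltList (l :: ls') = pvAltList ls' by simp [pvAltList, hb]]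
        exact ih ls' (by simpa using Nat.le_of_succ_le_succ hn)
      · rw [show pvAltList (l :: ls')
              = PySem.Str.strip l :: pvAltList (pvSkipRun (PySem.Str.strip l) ls') by
            simp [pvAltList, hb]]
        intro x hx
        rcases List.mem_cons.mp hx with h | h
        · simpa [h] using hb
        · exact ih _ (le_trans (pvSkipRun_length_le _ _)
            (by simpa using Nat.le_of_succ_le_succ hn)) x h

theorem str_append_ne_empty (a b : String) (ha : a ≠ "") : a ++ b ≠ "" := by
  intro h
  apply ha
  have := congrArg String.toList h
  simp at this
  cases this.1
  rfl

/-- pvGoB folds B's name list onto the accumulator string. -/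
theorem goB_eq_foldl (n : Nat) (ls : List String) (hn : ls.length ≤ n) (out : String) :
    pvGoB out ls
      = (pvAltList ls).foldl (fun o h => if o = "" then h else o ++ "," ++ h) out := by
  induction n generalizing ls out with
  | zero =>
    cases ls with
    | nil => simp [pvGoB, pvAltList]
    | cons l ls' => simp at hn
  | succ n ih =>
    cases ls with
    | nil => simp [pvGoB, pvAltList]
    | cons l ls' =>
      by_cases hb : PySem.Str.strip l = ""
      · rw [show pvGoB out (l :: ls') = pvGoB out ls' by simp [pvGoB, hb],
            show pvAltList (l :: ls') = pvAltList ls' by simp [pvAltList, hb]]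
        exact ih ls' (by simpa using Nat.le_of_succ_le_succ hn) out
      · rw [show pvGoB out (l :: ls')
              = pvGoB (if out = "" then PySem.Str.strip l else out ++ "," ++ PySem.Str.strip l)
                  (pvSkipRun (PySem.Str.strip l) ls') by simp [pvGoB, hb],
            show pvAltList (l :: ls')
              = PySem.Str.strip l :: pvAltList (pvSkipRun (PySem.Str.strip l) ls') by
            simp [pvAltList, hb]]
        rw [List.foldl_cons]
        exact ih _ (le_trans (pvSkipRun_length_le _ _)
          (by simpa using Nat.le_of_succ_le_succ hn)) _

/-- Folding comma-concatenation from a nonempty accumulator is appending the join. -/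
theorem foldl_comma_ne (names : List String) (out : String) (ho : out ≠ "") :
    names.foldl (fun o h => if o = "" then h else o ++ "," ++ h) out
      = (if names = [] then out else out ++ "," ++ PySem.Str.join "," names) := by
  induction names generalizing out with
  | nil => simp
  | cons a t ih =>
    rw [List.foldl_cons, if_neg ho]
    rw [ih (out ++ "," ++ a) (str_append_ne_empty _ _ (str_append_ne_empty _ _ ho))]
    cases t with
    | nil =>
      simp only [if_neg (List.cons_ne_nil a [])]
      apply String.toList_injective
      simp [PySem.Str.join, PySem.Chars.join_singleton]
    | cons b t' =>
      simp only [if_neg (List.cons_ne_nil b t'), if_neg (List.cons_ne_nil a (b :: t'))]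
      apply String.toList_injective
      simp [PySem.Str.join, PySem.Chars.join_cons_cons]

/-- Folding comma-concatenation from "" is the comma-join, when no name is blank. -/
theorem foldl_comma_empty (names : List String) (hne : ∀ x ∈ names, x ≠ "") :
    names.foldl (fun o h => if o = "" then h else o ++ "," ++ h) ""
      = PySem.Str.join "," names := by
  cases names with
  | nil =>
    apply String.toList_injective
    simp [PySem.Str.join, PySem.Chars.join_nil]
  | cons a t =>
    rw [List.foldl_cons, if_pos rfl]
    rw [foldl_comma_ne t a (hne a (by simp))]
    cases t with
    | nil =>
      apply String.toList_injective
      simp [PySem.Str.join, PySem.Chars.join_singleton]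
    | cons b t' =>
      rw [if_neg (List.cons_ne_nil b t')]
      apply String.toList_injective
      simp [PySem.Str.join, PySem.Chars.join_cons_cons]

-- ===== VERDICT =====
theorem merge_language_names_spec : Claim_equal_merge_language_names := by
  intro languages _
  unfold Spec_merge_language_names merge_language_names merge_language_names_alt
  rw [foldA_eq_foldNames, foldNames_eq_dedup]
  rw [goB_eq_foldl languages.length languages le_rfl ""]
  rw [foldl_comma_empty _ (altList_ne_empty languages.length languages le_rfl)]
  rw [altList_eq_dedup]
  simp
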